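-- pv_equiv track=rewrite | github.com/eduardovra/CrackingTheCodingInterview | chapter_16/q01_number_swapper.py | swap_numbers
-- ===== SOURCE A (Python) =====
-- def get_bit(num, bit):
--     return num & (1 << bit)
--
-- def set_bit(num, bit):
--     return num | (1 << bit)
--
-- def clear_bit(num, bit):
--     return num & ~(1 << bit)
--
-- def swap_numbers(a, b):
--     for i in range(32):
--         bit_a = get_bit(a, i)
--         bit_b = get_bit(b, i)
--
--         if bit_a and not bit_b:
--             # Clear bit on a and set bit on b
--             a = clear_bit(a, i)
--             b = set_bit(b, i)
--         elif bit_b and not bit_a: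
--             # Clear bit on b and set bit on a
--             b = clear_bit(b, i)
--             a = set_bit(a, i)
--
--     return a, b
-- ===== SOURCE B (Python) =====
-- def swap_numbers(a, b):
--     mask = (1 << 32) - 1
--     return (a & ~mask) | (b & mask), (b & ~mask) | (a & mask)
-- ===== Notes on version B (the rewrite author's own statement) =====
-- stated objective: faster
-- what changed: Replaced the 32-iteration per-bit loop (get_bit/set_bit/clear_bit with if/elif branches) by a single closed-form masking expression that swaps the low 32 bits wholesale: new_a = (a & ~mask) | (b & mask), new_b = (b & ~mask) | (a & mask) with mask = (1 << 32) - 1.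
import Mathlib
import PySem

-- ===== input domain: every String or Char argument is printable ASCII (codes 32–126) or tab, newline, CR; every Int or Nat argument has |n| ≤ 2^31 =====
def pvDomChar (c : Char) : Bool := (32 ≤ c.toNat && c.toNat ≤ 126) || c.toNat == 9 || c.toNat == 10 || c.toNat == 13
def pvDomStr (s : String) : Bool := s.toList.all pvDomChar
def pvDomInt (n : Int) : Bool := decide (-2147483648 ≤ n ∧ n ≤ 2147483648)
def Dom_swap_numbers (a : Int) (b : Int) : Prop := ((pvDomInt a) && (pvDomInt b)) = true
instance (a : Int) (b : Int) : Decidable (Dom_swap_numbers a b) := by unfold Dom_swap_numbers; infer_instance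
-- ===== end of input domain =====

-- B replaces A's 32-iteration per-bit swap loop by one closed-form masking expression
-- (keep each number's high bits, take the other's low 32 bits); equivalence is proved for all inputs.

-- ===== PORT A =====
def pv_get_bit (num : Int) (bit : Int) : Int := PySem.Int.band num ((1 : Int) <<< bit.toNat)

def pv_set_bit (num : Int) (bit : Int) : Int := PySem.Int.bor num ((1 : Int) <<< bit.toNat)

def pv_clear_bit (num : Int) (bit : Int) : Int := PySem.Int.band num (Int.not ((1 : Int) <<< bit.toNat))

-- body of A's `for i in range(32)` loop (state = the pair (a, b))
def pv_swap_step (st : Int × Int) (i : Int) : Int × Int :=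
  let bit_a := pv_get_bit st.1 i
  let bit_b := pv_get_bit st.2 i
  if bit_a ≠ 0 ∧ bit_b = 0 then (pv_clear_bit st.1 i, pv_set_bit st.2 i)
  else if bit_b ≠ 0 ∧ bit_a = 0 then (pv_set_bit st.1 i, pv_clear_bit st.2 i)
  else st

def swap_numbers (a : Int) (b : Int) : Int × Int :=
  (PySem.List.pyRange 0 32 1).foldl pv_swap_step (a, b)

-- ===== PORT B =====
def swap_numbers_alt (a : Int) (b : Int) : Int × Int :=
  let mask : Int := ((1 : Int) <<< (32 : Nat)) - 1
  (PySem.Int.bor (PySem.Int.band a (Int.not mask)) (PySem.Int.band b mask),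
   PySem.Int.bor (PySem.Int.band b (Int.not mask)) (PySem.Int.band a mask))

-- ===== PRECONDITION & SPEC =====
def Spec_swap_numbers (a : Int) (b : Int) (out : Int × Int) : Prop := out = swap_numbers_alt a b
instance (a : Int) (b : Int) (out : Int × Int) : Decidable (Spec_swap_numbers a b out) := by unfold Spec_swap_numbers; infer_instance

-- ===== CLAIM (what is proved, stated in full; the proofs are below) =====
def Claim_equal_swap_numbers : Prop := ∀ (a : Int) (b : Int), Dom_swap_numbers a b → Spec_swap_numbers a b (swap_numbers a b)

-- ===== LEMMAS AND PROOFS =====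

-- ---- Nat-level facts about single-bit masks ----

lemma nat_and_mod_two (a b : ℕ) : (a &&& b) % 2 = 1 ↔ (a % 2 = 1 ∧ b % 2 = 1) := by
  simpa [Nat.testBit_zero, Bool.and_eq_true, decide_eq_true_eq, eq_iff_iff] using
    congrArg (· = true) (Nat.testBit_and a b 0)

lemma nat_or_mod_two (a b : ℕ) : (a ||| b) % 2 = 1 ↔ (a % 2 = 1 ∨ b % 2 = 1) := by
  simpa [Nat.testBit_zero, Bool.or_eq_true, decide_eq_true_eq, eq_iff_iff] using
    congrArg (· = true) (Nat.testBit_or a b 0)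

lemma nat_and_div_two (a b : ℕ) : (a &&& b) / 2 = (a / 2) &&& (b / 2) := by
  apply Nat.eq_of_testBit_eq; intro i
  simp [Nat.testBit_div_two, Nat.testBit_and]

lemma nat_or_div_two (a b : ℕ) : (a ||| b) / 2 = (a / 2) ||| (b / 2) := by
  apply Nat.eq_of_testBit_eq; intro i
  simp [Nat.testBit_div_two, Nat.testBit_or]

lemma nat_or_add_and_aux : ∀ (fuel : ℕ), ∀ a b : ℕ, a ≤ fuel → (a ||| b) + (a &&& b) = a + b := by
  intro fuel
  induction fuel with
  | zero => intro a b ha; interval_cases a; simp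
  | succ f ih =>
    intro a b ha
    by_cases h0 : a = 0
    · subst h0; simp
    · have ih2 := ih (a / 2) (b / 2) (by omega)
      have e1 : (a ||| b) = 2 * ((a / 2) ||| (b / 2)) + ((a ||| b) % 2) := by
        rw [← nat_or_div_two]; omega
      have e2 : (a &&& b) = 2 * ((a / 2) &&& (b / 2)) + ((a &&& b) % 2) := by
        rw [← nat_and_div_two]; omega
      have m1 := nat_and_mod_two a b
      have m2 := nat_or_mod_two a b
      omega

-- a ||| b and a &&& b sum to a + b
lemma nat_or_add_and (a b : ℕ) : (a ||| b) + (a &&& b) = a + b :=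
  nat_or_add_and_aux a a b le_rfl

lemma nat_and_mul_two_pow (n d r : ℕ) (hr : r < 2 ^ n) : (2 ^ n * d) &&& r = 0 := by
  have h1 : r = (2 ^ n - 1) &&& r := by
    rw [Nat.and_comm, Nat.and_two_pow_sub_one_eq_mod, Nat.mod_eq_of_lt hr]
  calc (2 ^ n * d) &&& r = (2 ^ n * d) &&& ((2 ^ n - 1) &&& r) := by rw [← h1]
    _ = ((2 ^ n * d) &&& (2 ^ n - 1)) &&& r := by rw [Nat.and_assoc]
    _ = ((2 ^ n * d) % 2 ^ n) &&& r := by rw [Nat.and_two_pow_sub_one_eq_mod]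
    _ = 0 &&& r := by rw [Nat.mul_mod_right]
    _ = 0 := Nat.zero_and r

lemma nat_and_low_ones (n e r : ℕ) (he : 1 ≤ e) (hr : r < 2 ^ n) : (2 ^ n * e - 1) &&& r = r := by
  apply Nat.eq_of_testBit_eq; intro i
  rw [Nat.testBit_and]
  by_cases hi : i < n
  · have hmod : (2 ^ n * e - 1) % 2 ^ n = 2 ^ n - 1 := by
      obtain ⟨e', rfl⟩ : ∃ e', e = e' + 1 := ⟨e - 1, by omega⟩
      have h1 : 1 ≤ 2 ^ n := Nat.one_le_two_pow
      have h2 : 2 ^ n * (e' + 1) - 1 = 2 ^ n * e' + (2 ^ n - 1) := by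
        have h3 : 2 ^ n * (e' + 1) = 2 ^ n * e' + 2 ^ n := by ring
        omega
      rw [h2, Nat.mul_add_mod, Nat.mod_eq_of_lt (by omega)]
    have hx : (2 ^ n * e - 1).testBit i = true := by
      have h3 := Nat.testBit_mod_two_pow (2 ^ n * e - 1) n i
      rw [hmod, Nat.testBit_two_pow_sub_one] at h3
      simp [hi] at h3
      exact h3
    simp [hx]
  · have hrf : r.testBit i = false :=
      Nat.testBit_lt_two_pow (lt_of_lt_of_le hr (Nat.pow_le_pow_right (by norm_num) (by omega)))
    simp [hrf]

-- ---- casting helpers ----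

lemma int_two_pow (n : ℕ) : ((2 : Int) ^ n) = ((2 ^ n : ℕ) : Int) := by push_cast; ring

lemma toNat_two_pow (n : ℕ) : ((2 : Int) ^ n).toNat = 2 ^ n := by
  rw [int_two_pow, Int.toNat_natCast]

lemma toNat_two_pow_sub_one (n : ℕ) : ((2 : Int) ^ n - 1).toNat = 2 ^ n - 1 := by
  have h : (1 : ℕ) ≤ 2 ^ n := Nat.one_le_two_pow
  rw [show ((2 : Int) ^ n - 1) = ((2 ^ n - 1 : ℕ) : Int) by push_cast [h]; ring, Int.toNat_natCast]

lemma int_not_eq (x : Int) : Int.not x = -x - 1 := by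
  cases x with
  | ofNat k =>
    have h : Int.not (Int.ofNat k) = Int.negSucc k := rfl
    rw [h, Int.negSucc_eq, Int.ofNat_eq_natCast]; ring
  | negSucc k =>
    have h : Int.not (Int.negSucc k) = Int.ofNat k := rfl
    rw [h, Int.negSucc_eq, Int.ofNat_eq_natCast]; ring

lemma cast_mod_two (K : ℕ) : ((K : ℕ) : Int) % 2 = ((K % 2 : ℕ) : Int) := by push_cast; ring

lemma cast_neg_mod_two (K : ℕ) : (-(K : Int) - 1) % 2 = 1 - ((K % 2 : ℕ) : Int) := by omega

-- floor division/mod of x by 2^n, expressed over ℕ (x ≥ 0 directly, x < 0 via m = -x-1)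
lemma nonneg_divmod (x : Int) (n : ℕ) (hx : 0 ≤ x) :
    x / 2 ^ n = ((x.toNat / 2 ^ n : ℕ) : Int) ∧ x % 2 ^ n = ((x.toNat % 2 ^ n : ℕ) : Int) := by
  obtain ⟨A, rfl⟩ := Int.eq_ofNat_of_zero_le hx
  simp only [Int.ofNat_eq_natCast, Int.toNat_natCast]
  constructor <;> (push_cast; ring)

lemma neg_divmod (x : Int) (n : ℕ) (hx : x < 0) :
    x / 2 ^ n = -(((-x - 1).toNat / 2 ^ n : ℕ) : Int) - 1 ∧
    x % 2 ^ n = 2 ^ n - 1 - (((-x - 1).toNat % 2 ^ n : ℕ) : Int) := by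
  have hb : (0 : Int) < 2 ^ n := by positivity
  have hmx : ((-x - 1).toNat : Int) = -x - 1 := Int.toNat_of_nonneg (by omega)
  have hdm : ((2 : Int) ^ n) * (((-x - 1).toNat / 2 ^ n : ℕ) : Int) +
      (((-x - 1).toNat % 2 ^ n : ℕ) : Int) = ((-x - 1).toNat : Int) := by
    exact_mod_cast congrArg (fun t : ℕ => (t : Int)) (Nat.div_add_mod ((-x - 1).toNat) (2 ^ n))
  have hlt : (((-x - 1).toNat % 2 ^ n : ℕ) : Int) < 2 ^ n := by
    have h2 : (-x - 1).toNat % 2 ^ n < 2 ^ n := Nat.mod_lt _ (Nat.two_pow_pos n)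
    exact_mod_cast h2
  have h0 : (0 : Int) ≤ (((-x - 1).toNat % 2 ^ n : ℕ) : Int) := by positivity
  exact (Int.ediv_emod_unique hb).mpr
    ⟨by linear_combination -hdm - hmx, by linarith, by linarith⟩

-- the n-th two's-complement bit of x, as the Int 0 or 1
def pvBit (x : Int) (n : ℕ) : Int := (x / 2 ^ n) % 2

lemma pvBit_cases (x : Int) (n : ℕ) : pvBit x n = 0 ∨ pvBit x n = 1 := by
  unfold pvBit; omega

-- ---- the PySem bitwise operators on the masks the two programs use ----

lemma decide_toNat_zero : (decide ((0 : ℕ) = 1)).toNat = 0 := rfl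

lemma decide_toNat_one : (decide ((1 : ℕ) = 1)).toNat = 1 := rfl

lemma band_two_pow (x : Int) (n : ℕ) : PySem.Int.band x (2 ^ n) = 2 ^ n * pvBit x n := by
  have hb : (0 : Int) ≤ 2 ^ n := by positivity
  unfold PySem.Int.band pvBit
  by_cases hx : 0 ≤ x
  · rw [if_pos hx, if_pos hb]
    obtain ⟨hq, -⟩ := nonneg_divmod x n hx
    rw [hq, toNat_two_pow, Nat.and_two_pow, Nat.testBit_eq_decide_div_mod_eq, int_two_pow,
      cast_mod_two]
    rcases Nat.mod_two_eq_zero_or_one (x.toNat / 2 ^ n) with h | h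
    · rw [h, decide_toNat_zero]; omega
    · rw [h, decide_toNat_one]; omega
  · rw [if_neg hx, if_pos hb]
    obtain ⟨hq, -⟩ := neg_divmod x n (by omega)
    rw [hq, toNat_two_pow, Nat.two_pow_and, Nat.testBit_eq_decide_div_mod_eq, int_two_pow,
      cast_neg_mod_two]
    rcases Nat.mod_two_eq_zero_or_one ((-x - 1).toNat / 2 ^ n) with h | h
    · rw [h, decide_toNat_zero]
      simp only [Nat.mul_zero, Nat.mul_one, Nat.sub_zero, Nat.sub_self, Nat.cast_zero,
        Nat.cast_one, mul_zero, mul_one, sub_zero, sub_self, zero_mul, one_mul, add_zero,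
        zero_add, Nat.zero_mul, Nat.one_mul]
      try omega
    · rw [h, decide_toNat_one]
      simp only [Nat.mul_zero, Nat.mul_one, Nat.sub_zero, Nat.sub_self, Nat.cast_zero,
        Nat.cast_one, mul_zero, mul_one, sub_zero, sub_self, zero_mul, one_mul, add_zero,
        zero_add, Nat.zero_mul, Nat.one_mul]
      try omega

lemma band_not_two_pow (x : Int) (n : ℕ) :
    PySem.Int.band x (Int.not (2 ^ n)) = x - 2 ^ n * pvBit x n := by
  have hp : (0 : Int) < 2 ^ n := by positivity
  rw [int_not_eq]
  have hyneg : ¬ (0 : Int) ≤ -(2 : Int) ^ n - 1 := by omega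
  have hs : (-(-(2 : Int) ^ n - 1) - 1).toNat = 2 ^ n := by
    rw [show (-(-(2 : Int) ^ n - 1) - 1) = (2 : Int) ^ n by ring, toNat_two_pow]
  unfold PySem.Int.band pvBit
  by_cases hx : 0 ≤ x
  · rw [if_pos hx, if_neg hyneg]
    obtain ⟨hq, -⟩ := nonneg_divmod x n hx
    rw [hq, hs, Nat.and_two_pow, Nat.testBit_eq_decide_div_mod_eq, int_two_pow, cast_mod_two]
    have hxA : ((x.toNat : ℕ) : Int) = x := Int.toNat_of_nonneg hx
    have hdm := Nat.div_add_mod x.toNat (2 ^ n)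
    rcases Nat.mod_two_eq_zero_or_one (x.toNat / 2 ^ n) with h | h
    · rw [h, decide_toNat_zero]; omega
    · rw [h, decide_toNat_one]
      have hK1 : 1 ≤ x.toNat / 2 ^ n := by
        rcases Nat.eq_zero_or_pos (x.toNat / 2 ^ n) with h0 | h0
        · rw [h0] at h; simp at h
        · exact h0
      have h3 : 2 ^ n ≤ x.toNat := by
        have := (Nat.le_div_iff_mul_le (Nat.two_pow_pos n)).mp hK1
        omega
      simp only [Nat.mul_zero, Nat.mul_one, Nat.sub_zero, Nat.sub_self, Nat.cast_zero,
        Nat.cast_one, mul_zero, mul_one, sub_zero, sub_self, zero_mul, one_mul, add_zero,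
        zero_add, Nat.zero_mul, Nat.one_mul]
      try omega
  · rw [if_neg hx, if_neg hyneg]
    obtain ⟨hq, -⟩ := neg_divmod x n (by omega)
    have hmx : (((-x - 1).toNat : ℕ) : Int) = -x - 1 := Int.toNat_of_nonneg (by omega)
    rw [hq, hs, int_two_pow, cast_neg_mod_two]
    have hoa := nat_or_add_and ((-x - 1).toNat) (2 ^ n)
    rw [Nat.and_two_pow, Nat.testBit_eq_decide_div_mod_eq] at hoa
    rcases Nat.mod_two_eq_zero_or_one ((-x - 1).toNat / 2 ^ n) with h | h
    · rw [h, decide_toNat_zero] at hoa; rw [h]; omega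
    · rw [h, decide_toNat_one] at hoa; rw [h]; omega

lemma bor_two_pow (x : Int) (n : ℕ) :
    PySem.Int.bor x (2 ^ n) = x - 2 ^ n * pvBit x n + 2 ^ n := by
  have hb : (0 : Int) ≤ 2 ^ n := by positivity
  unfold PySem.Int.bor pvBit
  by_cases hx : 0 ≤ x
  · rw [if_pos hx, if_pos hb]
    obtain ⟨hq, -⟩ := nonneg_divmod x n hx
    have hxA : ((x.toNat : ℕ) : Int) = x := Int.toNat_of_nonneg hx
    rw [hq, toNat_two_pow, int_two_pow, cast_mod_two]
    have hoa := nat_or_add_and x.toNat (2 ^ n)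
    rw [Nat.and_two_pow, Nat.testBit_eq_decide_div_mod_eq] at hoa
    rcases Nat.mod_two_eq_zero_or_one (x.toNat / 2 ^ n) with h | h
    · rw [h, decide_toNat_zero] at hoa; rw [h]; omega
    · rw [h, decide_toNat_one] at hoa; rw [h]; omega
  · rw [if_neg hx, if_pos hb]
    obtain ⟨hq, -⟩ := neg_divmod x n (by omega)
    have hmx : (((-x - 1).toNat : ℕ) : Int) = -x - 1 := Int.toNat_of_nonneg (by omega)
    rw [hq, toNat_two_pow, Nat.and_two_pow, Nat.testBit_eq_decide_div_mod_eq, int_two_pow,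
      cast_neg_mod_two]
    rcases Nat.mod_two_eq_zero_or_one ((-x - 1).toNat / 2 ^ n) with h | h
    · rw [h, decide_toNat_zero]
      simp only [Nat.mul_zero, Nat.mul_one, Nat.sub_zero, Nat.sub_self, Nat.cast_zero,
        Nat.cast_one, mul_zero, mul_one, sub_zero, sub_self, zero_mul, one_mul, add_zero,
        zero_add, Nat.zero_mul, Nat.one_mul]
      try omega
    · rw [h, decide_toNat_one]
      have hK1 : 1 ≤ (-x - 1).toNat / 2 ^ n := by
        rcases Nat.eq_zero_or_pos ((-x - 1).toNat / 2 ^ n) with h0 | h0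
        · rw [h0] at h; simp at h
        · exact h0
      have h3 : 2 ^ n ≤ (-x - 1).toNat := by
        have := (Nat.le_div_iff_mul_le (Nat.two_pow_pos n)).mp hK1
        omega
      simp only [Nat.mul_zero, Nat.mul_one, Nat.sub_zero, Nat.sub_self, Nat.cast_zero,
        Nat.cast_one, mul_zero, mul_one, sub_zero, sub_self, zero_mul, one_mul, add_zero,
        zero_add, Nat.zero_mul, Nat.one_mul]
      try omega

lemma band_mask (x : Int) (n : ℕ) : PySem.Int.band x (2 ^ n - 1) = x % 2 ^ n := by
  have h1 : (1 : ℕ) ≤ 2 ^ n := Nat.one_le_two_pow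
  have hp : (0 : Int) ≤ 2 ^ n - 1 := by rw [int_two_pow]; omega
  unfold PySem.Int.band
  by_cases hx : 0 ≤ x
  · rw [if_pos hx, if_pos hp]
    obtain ⟨-, hr⟩ := nonneg_divmod x n hx
    rw [hr, toNat_two_pow_sub_one, Nat.and_two_pow_sub_one_eq_mod]
  · rw [if_neg hx, if_pos hp]
    obtain ⟨-, hr⟩ := neg_divmod x n (by omega)
    rw [hr, toNat_two_pow_sub_one, Nat.and_comm, Nat.and_two_pow_sub_one_eq_mod, int_two_pow]
    have hlt : (-x - 1).toNat % 2 ^ n < 2 ^ n := Nat.mod_lt _ (Nat.two_pow_pos n)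
    omega

lemma band_not_mask (x : Int) (n : ℕ) :
    PySem.Int.band x (Int.not (2 ^ n - 1)) = x - x % 2 ^ n := by
  have h1 : (1 : ℕ) ≤ 2 ^ n := Nat.one_le_two_pow
  rw [int_not_eq]
  have hyneg : ¬ (0 : Int) ≤ -((2 : Int) ^ n - 1) - 1 := by rw [int_two_pow]; omega
  have hs : (-(-((2 : Int) ^ n - 1) - 1) - 1).toNat = 2 ^ n - 1 := by
    rw [show (-(-((2 : Int) ^ n - 1) - 1) - 1) = (2 : Int) ^ n - 1 by ring, toNat_two_pow_sub_one]
  unfold PySem.Int.band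
  by_cases hx : 0 ≤ x
  · rw [if_pos hx, if_neg hyneg]
    obtain ⟨-, hr⟩ := nonneg_divmod x n hx
    have hxA : ((x.toNat : ℕ) : Int) = x := Int.toNat_of_nonneg hx
    rw [hr, hs, Nat.and_two_pow_sub_one_eq_mod]
    have hdm := Nat.div_add_mod x.toNat (2 ^ n)
    omega
  · rw [if_neg hx, if_neg hyneg]
    obtain ⟨-, hr⟩ := neg_divmod x n (by omega)
    have hmx : (((-x - 1).toNat : ℕ) : Int) = -x - 1 := Int.toNat_of_nonneg (by omega)
    rw [hr, hs, int_two_pow]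
    have hoa := nat_or_add_and ((-x - 1).toNat) (2 ^ n - 1)
    rw [Nat.and_two_pow_sub_one_eq_mod] at hoa
    have hlt : (-x - 1).toNat % 2 ^ n < 2 ^ n := Nat.mod_lt _ (Nat.two_pow_pos n)
    have hle : (-x - 1).toNat % 2 ^ n ≤ (-x - 1).toNat := Nat.mod_le _ _
    omega

lemma bor_disjoint (d r : Int) (n : ℕ) (hr0 : 0 ≤ r) (hr : r < 2 ^ n) :
    PySem.Int.bor (2 ^ n * d) r = 2 ^ n * d + r := by
  have hp : (0 : Int) < 2 ^ n := by positivity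
  have hrr : ((r.toNat : ℕ) : Int) = r := Int.toNat_of_nonneg hr0
  have hrn : r.toNat < 2 ^ n := by rw [int_two_pow] at hr; omega
  unfold PySem.Int.bor
  by_cases hd : 0 ≤ d
  · have hq : (0 : Int) ≤ 2 ^ n * d := by positivity
    rw [if_pos hq, if_pos hr0]
    have hdd : ((d.toNat : ℕ) : Int) = d := Int.toNat_of_nonneg hd
    have hcast : ((2 ^ n * d.toNat : ℕ) : Int) = 2 ^ n * d := by push_cast [hdd]; ring
    have hqt : ((2 : Int) ^ n * d).toNat = 2 ^ n * d.toNat := by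
      rw [← hcast, Int.toNat_natCast]
    rw [hqt, show (2 : Int) ^ n * d = ((2 ^ n * d.toNat : ℕ) : Int) from hcast.symm]
    have hoa := nat_or_add_and (2 ^ n * d.toNat) r.toNat
    rw [nat_and_mul_two_pow n d.toNat r.toNat hrn] at hoa
    omega
  · have hneg : 2 ^ n * d < 0 := mul_neg_of_pos_of_neg hp (by omega)
    rw [if_neg (by omega), if_pos hr0]
    have hdd : (((-d).toNat : ℕ) : Int) = -d := Int.toNat_of_nonneg (by omega)
    have hcast : ((2 ^ n * (-d).toNat : ℕ) : Int) = -(2 ^ n * d) := by push_cast [hdd]; ring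
    have h2 : (1 : ℕ) ≤ 2 ^ n * (-d).toNat := by omega
    have he1 : 1 ≤ (-d).toNat := by omega
    have hmq : (-(2 ^ n * d) - 1).toNat = 2 ^ n * (-d).toNat - 1 := by
      rw [show -(2 ^ n * d) - 1 = ((2 ^ n * (-d).toNat - 1 : ℕ) : Int) by omega, Int.toNat_natCast]
    rw [hmq, nat_and_low_ones n ((-d).toNat) r.toNat he1 hrn,
      show (2 : Int) ^ n * d = -((2 ^ n * (-d).toNat : ℕ) : Int) by omega]
    have hle : r.toNat ≤ 2 ^ n * (-d).toNat - 1 := by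
      have : 2 ^ n ≤ 2 ^ n * (-d).toNat := Nat.le_mul_of_pos_right _ (by omega)
      omega
    omega

-- ---- the loop invariant ------ ---- the loop invariant ----

lemma emod_step (x : Int) (n : ℕ) :
    x % 2 ^ (n + 1) = x % 2 ^ n + 2 ^ n * pvBit x n := by
  have hT : (0 : Int) < 2 ^ n := by positivity
  have hqr := Int.mul_ediv_add_emod x (2 ^ n)
  have hr0 : 0 ≤ x % 2 ^ n := Int.emod_nonneg x (by positivity)
  have hrT : x % 2 ^ n < 2 ^ n := Int.emod_lt_of_pos x hT
  unfold pvBit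
  set q := x / 2 ^ n with hq
  set r := x % 2 ^ n with hr
  have hq' : q = 2 * (q / 2) + q % 2 := by omega
  have key : x = (2 ^ n * (q % 2) + r) + 2 ^ (n + 1) * (q / 2) := by
    rw [pow_succ]; linear_combination hqr.symm + (2 : Int) ^ n * hq'
  have hb2 : 0 ≤ 2 ^ n * (q % 2) + r ∧ 2 ^ n * (q % 2) + r < 2 ^ (n + 1) := by
    rw [pow_succ]
    rcases Int.emod_two_eq q with h | h <;> rw [h] <;> constructor <;> nlinarith
  calc x % 2 ^ (n + 1) = ((2 ^ n * (q % 2) + r) + 2 ^ (n + 1) * (q / 2)) % 2 ^ (n + 1) := by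
        rw [← key]
    _ = (2 ^ n * (q % 2) + r) % 2 ^ (n + 1) := Int.add_mul_emod_self_left _ _ _
    _ = 2 ^ n * (q % 2) + r := Int.emod_eq_of_lt hb2.1 hb2.2
    _ = r + 2 ^ n * (q % 2) := by ring

lemma step_eq (x y : Int) (n : ℕ) :
    pv_swap_step (x, y) (Int.ofNat n) =
      (x - 2 ^ n * pvBit x n + 2 ^ n * pvBit y n,
       y - 2 ^ n * pvBit y n + 2 ^ n * pvBit x n) := by
  have hT : (0 : Int) < 2 ^ n := by positivity
  unfold pv_swap_step pv_get_bit pv_set_bit pv_clear_bit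
  simp only [Int.ofNat_eq_natCast, Int.toNat_natCast, Int.shiftLeft_eq, one_mul]
  rw [band_two_pow, band_two_pow, band_not_two_pow, band_not_two_pow, bor_two_pow, bor_two_pow]
  rcases pvBit_cases x n with hx | hx <;> rcases pvBit_cases y n with hy | hy <;>
    rw [hx, hy] <;> split_ifs <;> simp_all

lemma loop_pres_ediv (x y : Int) (n : ℕ) :
    (x - x % 2 ^ n + y % 2 ^ n) / 2 ^ n = x / 2 ^ n := by
  have hT : (0 : Int) < 2 ^ n := by positivity
  have hqr := Int.mul_ediv_add_emod x (2 ^ n)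
  have hy0 : 0 ≤ y % 2 ^ n := Int.emod_nonneg y (by positivity)
  have hyT : y % 2 ^ n < 2 ^ n := Int.emod_lt_of_pos y hT
  have hrw : x - x % 2 ^ n + y % 2 ^ n = y % 2 ^ n + 2 ^ n * (x / 2 ^ n) := by
    linear_combination -hqr
  rw [hrw, Int.add_mul_ediv_left _ _ (by positivity : (2 : Int) ^ n ≠ 0),
    Int.ediv_eq_zero_of_lt hy0 hyT, zero_add]

lemma loop_inv (a b : Int) (n : ℕ) :
    ((List.range n).map Int.ofNat).foldl pv_swap_step (a, b) =
      (a - a % 2 ^ n + b % 2 ^ n, b - b % 2 ^ n + a % 2 ^ n) := by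
  induction n with
  | zero => simp
  | succ n ih =>
    rw [List.range_succ, List.map_append, List.foldl_append, ih]
    simp only [List.map_cons, List.map_nil, List.foldl_cons, List.foldl_nil]
    rw [step_eq]
    have hA : pvBit (a - a % 2 ^ n + b % 2 ^ n) n = pvBit a n := by
      unfold pvBit; rw [loop_pres_ediv]
    have hB : pvBit (b - b % 2 ^ n + a % 2 ^ n) n = pvBit b n := by
      unfold pvBit; rw [loop_pres_ediv]
    rw [hA, hB, Prod.mk.injEq]
    rw [emod_step a n, emod_step b n]
    constructor <;> ring

lemma swap_numbers_char (a b : Int) :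
    swap_numbers a b = (a - a % 2 ^ 32 + b % 2 ^ 32, b - b % 2 ^ 32 + a % 2 ^ 32) := by
  unfold swap_numbers
  rw [show PySem.List.pyRange 0 32 1 = (List.range 32).map Int.ofNat by decide]
  exact loop_inv a b 32

lemma swap_numbers_alt_char (a b : Int) :
    swap_numbers_alt a b = (a - a % 2 ^ 32 + b % 2 ^ 32, b - b % 2 ^ 32 + a % 2 ^ 32) := by
  unfold swap_numbers_alt
  simp only [Int.shiftLeft_eq, one_mul]
  rw [band_not_mask, band_not_mask, band_mask, band_mask]
  have hT : (0 : Int) < 2 ^ 32 := by positivity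
  have ha : a - a % 2 ^ 32 = 2 ^ 32 * (a / 2 ^ 32) := by
    have h := Int.mul_ediv_add_emod a (2 ^ 32); linarith
  have hb : b - b % 2 ^ 32 = 2 ^ 32 * (b / 2 ^ 32) := by
    have h := Int.mul_ediv_add_emod b (2 ^ 32); linarith
  rw [ha, hb,
    bor_disjoint _ _ 32 (Int.emod_nonneg b (by positivity)) (Int.emod_lt_of_pos b hT),
    bor_disjoint _ _ 32 (Int.emod_nonneg a (by positivity)) (Int.emod_lt_of_pos a hT),
    ← ha, ← hb]

-- ===== VERDICT (by name: the statement is the Claim_ definition above) =====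
theorem swap_numbers_spec : Claim_equal_swap_numbers := by
  intro a b _
  unfold Spec_swap_numbers
  rw [swap_numbers_char, swap_numbers_alt_char]
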